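-- pv_equiv track=rewrite | github.com/MNSM92/Search-Engine-with-nltk | tools.py | retrieve_documents
-- ===== SOURCE A (Python) =====
-- def retrieve_documents(doc_words, query):
--     docs = []
--     for doc_id in doc_words.keys():
--         found = False
--         i = 0
--         while i<len(query) and not found:
--             word = query[i]
--             if word in doc_words.get(doc_id):
--                 docs.append(doc_id)
--                 found=True
--             else:
--                 i+=1
--     return docs
-- ===== SOURCE B (Python) =====
-- def retrieve_documents(doc_words, query):
--     q = set(query)
--     docs = []
--     for doc_id, words in doc_words.items():
--         for w in words:
--             if w in q:
--                 docs.append(doc_id)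
--                 break
--     return docs
-- ===== Notes on version B (the rewrite author's own statement) =====
-- stated objective: faster
-- what changed: Instead of scanning the query list per document and doing a linear 'in' test against the document's word list, B builds a set of the query once and scans each document's own words, breaking on the first word found in the set.
import Mathlib
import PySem

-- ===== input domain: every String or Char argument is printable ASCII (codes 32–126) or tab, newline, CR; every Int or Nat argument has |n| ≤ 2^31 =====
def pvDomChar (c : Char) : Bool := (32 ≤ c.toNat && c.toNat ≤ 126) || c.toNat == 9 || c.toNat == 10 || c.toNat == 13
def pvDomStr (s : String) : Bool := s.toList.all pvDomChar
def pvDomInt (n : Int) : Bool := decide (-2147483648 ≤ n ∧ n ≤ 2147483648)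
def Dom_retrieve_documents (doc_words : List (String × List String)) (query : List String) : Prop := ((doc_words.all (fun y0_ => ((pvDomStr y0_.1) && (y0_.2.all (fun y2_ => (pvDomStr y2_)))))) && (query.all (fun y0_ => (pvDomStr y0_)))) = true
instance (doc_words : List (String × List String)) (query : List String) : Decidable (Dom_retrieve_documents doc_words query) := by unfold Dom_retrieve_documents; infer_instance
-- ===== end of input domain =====

-- B builds the query as a set once and scans each document's own word list (first-hit break),
-- instead of A's per-document scan of the query with linear membership tests in the word list.


-- ===== PORT A =====
-- A's inner 'while i < len(query) and not found' loop: walks the query, appends doc_id and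
-- stops at the first query word contained in the doc's word list.
-- 'doc_words.get(doc_id)' is looked up with getD; exact here because doc_id ranges over the dict's keys.
def pvAWhile (words : List String) (doc_id : String) (docs : List String) : List String → List String
  | [] => docs
  | word :: rest => if word ∈ words then docs ++ [doc_id] else pvAWhile words doc_id docs rest

def retrieve_documents (doc_words : List (String × List String)) (query : List String) : List String :=
  let d := PySem.Dict.ofList doc_words
  d.keys.foldl (fun docs doc_id => pvAWhile (d.getD doc_id []) doc_id docs query) []

-- ===== PORT B =====
-- B's inner 'for w in words: if w in q: append; break' loop, as the first-hit test it performs.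
def pvBScan (q : List String) : List String → Bool
  | [] => false
  | w :: rest => if w ∈ q then true else pvBScan q rest

def retrieve_documents_alt (doc_words : List (String × List String)) (query : List String) : List String :=
  let q := PySem.Set.ofList query
  (PySem.Dict.ofList doc_words).items.foldl
    (fun docs p => if pvBScan q p.2 then docs ++ [p.1] else docs) []

-- ===== PRECONDITION & SPEC =====
def Spec_retrieve_documents (doc_words : List (String × List String)) (query : List String) (out : List String) : Prop := out = retrieve_documents_alt doc_words query
instance (doc_words : List (String × List String)) (query : List String) (out : List String) : Decidable (Spec_retrieve_documents doc_words query out) := by unfold Spec_retrieve_documents; infer_instance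

-- ===== CLAIM (what is proved, stated in full; the proofs are below) =====
def Claim_equal_retrieve_documents : Prop := ∀ (doc_words : List (String × List String)) (query : List String), Dom_retrieve_documents doc_words query → Spec_retrieve_documents doc_words query (retrieve_documents doc_words query)

-- ===== LEMMAS AND PROOFS =====

theorem pvBScan_spec (q words : List String) :
    pvBScan q words = true ↔ ∃ w ∈ words, w ∈ q := by
  induction words with
  | nil => simp [pvBScan]
  | cons w rest ih =>
    by_cases hw : w ∈ q <;> simp [pvBScan, hw, ih]

theorem pvAWhile_spec (words : List String) (doc_id : String) (docs query : List String) :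
    pvAWhile words doc_id docs query
      = if pvBScan (PySem.Set.ofList query) words then docs ++ [doc_id] else docs := by
  induction query with
  | nil => simp [pvAWhile, pvBScan_spec]
  | cons w rest ih =>
    by_cases hw : w ∈ words
    · rw [if_pos]
      · simp [pvAWhile, hw]
      · exact (pvBScan_spec _ _).2 ⟨w, hw, by simp [PySem.Set.mem_ofList]⟩
    · simp only [pvAWhile, hw, if_false, ih]
      have hiff : (pvBScan (PySem.Set.ofList (w :: rest)) words = true)
          ↔ (pvBScan (PySem.Set.ofList rest) words = true) := by
        rw [pvBScan_spec, pvBScan_spec]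
        constructor
        · rintro ⟨x, hx, hxq⟩
          simp only [PySem.Set.mem_ofList, List.mem_cons] at hxq
          rcases hxq with rfl | hxq
          · exact absurd hx hw
          · exact ⟨x, hx, by simp [PySem.Set.mem_ofList, hxq]⟩
        · rintro ⟨x, hx, hxq⟩
          simp only [PySem.Set.mem_ofList] at hxq
          exact ⟨x, hx, by simp [PySem.Set.mem_ofList, hxq]⟩
      have heq : pvBScan (PySem.Set.ofList (w :: rest)) words
          = pvBScan (PySem.Set.ofList rest) words := by
        cases hA : pvBScan (PySem.Set.ofList (w :: rest)) words <;>
          cases hB : pvBScan (PySem.Set.ofList rest) words <;> simp_all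
      rw [heq]

theorem pvFoldl_congr {α β : Type} (l : List α) (f g : β → α → β) (b : β)
    (h : ∀ b a, a ∈ l → f b a = g b a) : l.foldl f b = l.foldl g b := by
  induction l generalizing b with
  | nil => rfl
  | cons a rest ih =>
    simp only [List.foldl_cons, h b a (by simp)]
    exact ih _ (fun b a ha => h b a (by simp [ha]))

-- ===== VERDICT (by name: the statement is the Claim_ definition above) =====
theorem retrieve_documents_spec : Claim_equal_retrieve_documents := by
  intro doc_words query _
  unfold Spec_retrieve_documents retrieve_documents retrieve_documents_alt
  set d := PySem.Dict.ofList doc_words with hd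
  have hnd : d.keys.Nodup := PySem.Dict.nodup_keys_ofList doc_words
  rw [PySem.Dict.items_eq_map_keys d hnd [], List.foldl_map]
  apply pvFoldl_congr
  intro docs k _
  rw [pvAWhile_spec]
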